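-- pv_equiv track=rewrite | github.com/Muso-AI/weblate-docker-compose | machinery_custom/plural.py | restore_placeholders
-- ===== SOURCE A (Python) =====
-- def restore_placeholders(
--     translated_text: str, replacements: dict[str, str]
-- ) -> str:
--     """
--     Restore all variable placeholders in translated text.
--
--     Args:
--         translated_text: The translated text
--         replacements: Dict mapping placeholder names to the values used for replacement
--
--     Returns:
--         Text with all placeholders restored
--     """
--     if not replacements:
--         return translated_text
--
--     result = translated_text
--
--     # Group placeholders by their replacement value
--     # (multiple placeholders might have the same value)
--     value_to_placeholders: dict[str, list[str]] = {}
--     for name, value in replacements.items():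
--         if value not in value_to_placeholders:
--             value_to_placeholders[value] = []
--         value_to_placeholders[value].append(name)
--
--     # For each unique replacement value, restore placeholders
--     for value, placeholder_names in value_to_placeholders.items():
--         # If multiple placeholders had the same value, we need to restore them
--         # We'll use a simple approach: replace all occurrences of the value
--         # with the first placeholder, since they all had the same value
--         # (this is the best we can do without more context)
--         if len(placeholder_names) == 1:
--             # Simple case: one placeholder for this value
--             result = result.replace(value, f"{{{placeholder_names[0]}}}")
--         else:
--             # Multiple placeholders had same value - restore to first one
--             # The caller should use different values if they need to distinguish
--             result = result.replace(value, f"{{{placeholder_names[0]}}}")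
--
--     return result
-- ===== SOURCE B (Python) =====
-- def restore_placeholders(
--     translated_text: str, replacements: dict[str, str]
-- ) -> str:
--     """Restore placeholders with a shrinking worklist: take the first pending
--     (name, value) pair, replace the value with {name}, and drop every later
--     pair that carries the same value before continuing."""
--     text = translated_text
--     items = list(replacements.items())
--     while items:
--         name, value = items[0]
--         items = [(n, v) for (n, v) in items[1:] if v != value]
--         text = text.replace(value, "{" + name + "}")
--     return text
-- ===== Notes on version B (the rewrite author's own statement) =====
-- stated objective: simpler
-- what changed: Replaced A's two staged passes (build a value->placeholder-names grouping dict, then iterate its items replacing each value with its first name) by a shrinking-worklist loop with no auxiliary index: pop the first pending pair, replace its value with {name}, and filter every later pair with the same value out of the worklist.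
import Mathlib
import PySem

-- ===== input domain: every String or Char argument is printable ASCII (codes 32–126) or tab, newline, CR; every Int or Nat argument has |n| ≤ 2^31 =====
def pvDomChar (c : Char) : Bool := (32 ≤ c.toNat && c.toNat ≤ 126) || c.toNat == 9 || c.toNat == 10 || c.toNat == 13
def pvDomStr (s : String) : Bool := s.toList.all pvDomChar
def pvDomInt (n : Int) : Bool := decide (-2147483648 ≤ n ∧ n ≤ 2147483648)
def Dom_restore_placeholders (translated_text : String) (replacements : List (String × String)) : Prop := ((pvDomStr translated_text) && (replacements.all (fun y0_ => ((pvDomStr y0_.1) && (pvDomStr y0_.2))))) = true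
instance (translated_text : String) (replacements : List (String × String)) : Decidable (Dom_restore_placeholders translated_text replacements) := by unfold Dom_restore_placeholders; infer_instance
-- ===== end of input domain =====

-- B drops A's grouping dict and staged passes for a shrinking-worklist loop:
-- replace the first pending value, filter its duplicates out of the tail, repeat. Simpler.

-- ===== PORT A =====
def restore_placeholders (translated_text : String) (replacements : List (String × String)) : String :=
  if replacements.isEmpty then translated_text
  else
    let value_to_placeholders : PySem.Dict String (List String) :=
      replacements.foldl (fun d p =>
        (if d.contains p.2 then d else d.insert p.2 []).modify p.2 [] (fun l => l ++ [p.1]))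
        PySem.Dict.empty
    value_to_placeholders.items.foldl (fun result q =>
      if q.2.length == 1 then
        PySem.Str.replace result q.1 ("{" ++ ((PySem.List.pyGet? q.2 0).getD "") ++ "}")
      else
        PySem.Str.replace result q.1 ("{" ++ ((PySem.List.pyGet? q.2 0).getD "") ++ "}"))
      translated_text

-- ===== PORT B =====
-- Source B's while-loop over a shrinking worklist, as the corresponding well-founded recursion
def pvWorklist (text : String) (items : List (String × String)) : String :=
  match items with
  | [] => text
  | (name, value) :: rest =>
      pvWorklist (PySem.Str.replace text value ("{" ++ name ++ "}"))
        (rest.filter (fun p => !(p.2 == value)))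
termination_by items.length
decreasing_by
  simp only [List.length_unattach, List.length_cons]
  exact Nat.lt_succ_of_le ((List.length_filter_le _ _).trans (le_of_eq List.length_attach))

def restore_placeholders_alt (translated_text : String) (replacements : List (String × String)) : String :=
  pvWorklist translated_text replacements

-- ===== PRECONDITION & SPEC =====
def Spec_restore_placeholders (translated_text : String) (replacements : List (String × String)) (out : String) : Prop := out = restore_placeholders_alt translated_text replacements
instance (translated_text : String) (replacements : List (String × String)) (out : String) : Decidable (Spec_restore_placeholders translated_text replacements out) := by unfold Spec_restore_placeholders; infer_instance

-- ===== CLAIM (what is proved, stated in full; the proofs are below) =====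
def Claim_equal_restore_placeholders : Prop := ∀ (translated_text : String) (replacements : List (String × String)), Dom_restore_placeholders translated_text replacements → Spec_restore_placeholders translated_text replacements (restore_placeholders translated_text replacements)

-- ===== LEMMAS AND PROOFS =====

-- first placeholder name recorded for value v (A's `placeholder_names[0]`)
def pvName (v : String) (reps : List (String × String)) : String :=
  ((reps.filter (fun p => p.2 == v)).map (fun p => p.1)).headD ""

def pvStep (r v name : String) : String := PySem.Str.replace r v ("{" ++ name ++ "}")

-- the sublist of pairs whose value appears for the first time (given already-seen values s)
def pvFirsts : List (String × String) → PySem.Set String → List (String × String)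
  | [], _ => []
  | p :: ps, s =>
    if PySem.Set.contains s p.2 then pvFirsts ps s
    else p :: pvFirsts ps (PySem.Set.add s p.2)

theorem astep_eq (d : PySem.Dict String (List String)) (p : String × String) :
    (if d.contains p.2 then d else d.insert p.2 []).modify p.2 [] (fun l => l ++ [p.1])
    = d.modify p.2 [] (fun l => l ++ [p.1]) := by
  by_cases h : d.contains p.2 = true
  · rw [if_pos h]
  · have h' : d.contains p.2 = false := by simpa using h
    rw [if_neg h]
    simp [PySem.Dict.modify, PySem.Dict.insert_insert_self, PySem.Dict.getD_insert_self,
      PySem.Dict.getD_of_not_contains _ _ h']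

theorem keysA (reps : List (String × String)) :
    (reps.foldl (fun d p => d.modify p.2 [] (fun l => l ++ [p.1])) PySem.Dict.empty).keys
    = PySem.Set.ofList (reps.map (fun p => p.2)) := by
  have h := PySem.Dict.keys_foldl_modify_key reps (fun p => p.2) []
    (fun _ p l => l ++ [p.1]) PySem.Dict.empty
  simpa [PySem.Dict.keys_empty, PySem.Set.update_nil_left] using h

theorem nodupA (reps : List (String × String)) :
    (reps.foldl (fun d p => d.modify p.2 [] (fun l => l ++ [p.1])) PySem.Dict.empty).keys.Nodup :=
  PySem.Dict.nodup_keys_foldl_modify_key reps (fun p => p.2) []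
    (fun _ p l => l ++ [p.1]) PySem.Dict.empty (by simp [PySem.Dict.keys_empty])

theorem getDA (reps : List (String × String)) (v : String) :
    (reps.foldl (fun d p => d.modify p.2 [] (fun l => l ++ [p.1])) PySem.Dict.empty).getD v []
    = (reps.filter (fun p => p.2 == v)).map (fun p => p.1) := by
  have h1 : reps.foldl (fun d p => d.modify p.2 [] (fun l => l ++ [p.1])) PySem.Dict.empty
      = (reps.map (fun p => (p.2, p.1))).foldl
          (fun d q => d.modify q.1 [] (fun l => l ++ [q.2])) PySem.Dict.empty := by
    rw [List.foldl_map]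
  rw [h1, PySem.Dict.getD_foldl_modify_append]
  simp [List.filter_map, Function.comp_def]

theorem itemsA (reps : List (String × String)) :
    (reps.foldl (fun d p => d.modify p.2 [] (fun l => l ++ [p.1])) PySem.Dict.empty).items
    = (PySem.Set.ofList (reps.map (fun p => p.2))).map
        (fun v => (v, (reps.filter (fun p => p.2 == v)).map (fun p => p.1))) := by
  rw [PySem.Dict.items_eq_map_keys _ (nodupA reps) [], keysA]
  exact List.map_congr_left (fun v _ => by rw [getDA])

theorem pyGet0 (l : List String) : (PySem.List.pyGet? l 0).getD "" = l.headD "" := by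
  cases l <;> simp [PySem.List.pyGet?, PySem.List.pyIdx?]

theorem firsts_map (reps : List (String × String)) : ∀ (s : PySem.Set String),
    ((PySem.Set.ofList (reps.map (fun p => p.2))).filter
        (fun v => !(PySem.Set.contains s v))).map (fun v => (v, pvName v reps))
    = (pvFirsts reps s).map (fun p => (p.2, p.1)) := by
  induction reps with
  | nil => intro s; simp [pvFirsts, PySem.Set.ofList]
  | cons p ps ih =>
    intro s
    rw [List.map_cons, PySem.Set.ofList_cons]
    simp only [pvFirsts]
    by_cases h : PySem.Set.contains s p.2 = true
    · have hmem : p.2 ∈ s := by simpa [PySem.Set.contains] using h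
      rw [List.filter_cons_of_neg (by simp [PySem.Set.contains, hmem]), if_pos h]
      have hfilter : ((PySem.Set.ofList (ps.map (fun p => p.2))).discard p.2).filter
          (fun v => !(PySem.Set.contains s v))
          = (PySem.Set.ofList (ps.map (fun p => p.2))).filter
              (fun v => !(PySem.Set.contains s v)) := by
        unfold PySem.Set.discard
        rw [List.filter_filter]
        refine List.filter_congr (fun v _ => ?_)
        by_cases hvs : v ∈ s
        · simp [PySem.Set.contains, hvs]
        · have hne : v ≠ p.2 := fun he => hvs (he ▸ hmem)
          simp [PySem.Set.contains, hvs, hne]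
      rw [hfilter]
      have hname : ∀ v ∈ (PySem.Set.ofList (ps.map (fun p => p.2))).filter
          (fun v => !(PySem.Set.contains s v)),
          (fun v => (v, pvName v (p :: ps))) v = (fun v => (v, pvName v ps)) v := by
        intro v hv
        have hvm : v ∉ s := by
          have := List.of_mem_filter hv
          simpa [PySem.Set.contains] using this
        have hne : ¬ ((p.2 == v) = true) := by
          simp only [beq_iff_eq]; exact fun he => hvm (he ▸ hmem)
        simp only [pvName, List.filter_cons]
        rw [if_neg hne]
      rw [List.map_congr_left hname, ih s]
    · have h' : PySem.Set.contains s p.2 = false := by simpa using h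
      have hmem : p.2 ∉ s := by simpa [PySem.Set.contains] using h'
      rw [List.filter_cons_of_pos (by simp only [h', Bool.not_false]), if_neg h]
      have hadd : PySem.Set.add s p.2 = s ++ [p.2] := PySem.Set.add_of_not_mem hmem
      have hfilter : ((PySem.Set.ofList (ps.map (fun p => p.2))).discard p.2).filter
          (fun v => !(PySem.Set.contains s v))
          = (PySem.Set.ofList (ps.map (fun p => p.2))).filter
              (fun v => !(PySem.Set.contains (PySem.Set.add s p.2) v)) := by
        unfold PySem.Set.discard
        rw [List.filter_filter]
        refine List.filter_congr (fun v _ => ?_)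
        rw [hadd]
        by_cases hvp : v = p.2 <;> by_cases hvs : v ∈ s <;>
          simp [PySem.Set.contains, hvp, hvs]
      rw [List.map_cons, hfilter]
      have hname : ∀ v ∈ (PySem.Set.ofList (ps.map (fun p => p.2))).filter
          (fun v => !(PySem.Set.contains (PySem.Set.add s p.2) v)),
          (fun v => (v, pvName v (p :: ps))) v = (fun v => (v, pvName v ps)) v := by
        intro v hv
        have hvm : v ∉ PySem.Set.add s p.2 := by
          have := List.of_mem_filter hv
          simpa [PySem.Set.contains] using this
        have hne : ¬ ((p.2 == v) = true) := by
          simp only [beq_iff_eq]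
          intro he
          exact hvm ((PySem.Set.mem_add s p.2 v).mpr (Or.inr he.symm))
        simp only [pvName, List.filter_cons]
        rw [if_neg hne]
      rw [List.map_congr_left hname, ih (PySem.Set.add s p.2)]
      have hhead : pvName p.2 (p :: ps) = p.1 := by
        simp only [pvName, List.filter_cons]
        rw [if_pos (by simp)]
        simp
      rw [hhead]
      rfl

-- pvFirsts only inspects membership of the seen set
theorem pvFirsts_congr (l : List (String × String)) : ∀ (s₁ s₂ : PySem.Set String),
    (∀ v, v ∈ s₁ ↔ v ∈ s₂) → pvFirsts l s₁ = pvFirsts l s₂ := by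
  induction l with
  | nil => intro _ _ _; rfl
  | cons p ps ih =>
    intro s₁ s₂ hm
    simp only [pvFirsts]
    have hc : PySem.Set.contains s₁ p.2 = PySem.Set.contains s₂ p.2 := by
      simp [PySem.Set.contains]
      by_cases h : p.2 ∈ s₁
      · simp [h, (hm p.2).mp h]
      · have h2 : p.2 ∉ s₂ := fun hx => h ((hm p.2).mpr hx)
        simp [h, h2]
    rw [hc]
    by_cases h : PySem.Set.contains s₂ p.2 = true
    · rw [if_pos h, if_pos h]; exact ih s₁ s₂ hm
    · rw [if_neg h, if_neg h]
      have : ∀ v, v ∈ PySem.Set.add s₁ p.2 ↔ v ∈ PySem.Set.add s₂ p.2 := by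
        intro v
        rw [PySem.Set.mem_add, PySem.Set.mem_add]
        exact or_congr (hm v) Iff.rfl
      rw [ih _ _ this]

-- adding v to the seen set = filtering v out of the pending pairs
theorem pvFirsts_add (l : List (String × String)) : ∀ (s : PySem.Set String) (v : String),
    pvFirsts l (PySem.Set.add s v) = pvFirsts (l.filter (fun p => !(p.2 == v))) s := by
  induction l with
  | nil => intro _ _; rfl
  | cons p ps ih =>
    intro s v
    by_cases hpv : p.2 = v
    · rw [List.filter_cons_of_neg (by simp [hpv])]
      simp only [pvFirsts]
      rw [if_pos (by simp [PySem.Set.contains, PySem.Set.mem_add, hpv])]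
      exact ih s v
    · rw [List.filter_cons_of_pos (by simp [hpv])]
      simp only [pvFirsts]
      have hc : PySem.Set.contains (PySem.Set.add s v) p.2 = PySem.Set.contains s p.2 := by
        simp [PySem.Set.contains, PySem.Set.mem_add, hpv]
      rw [hc]
      by_cases h : PySem.Set.contains s p.2 = true
      · rw [if_pos h, if_pos h]; exact ih s v
      · rw [if_neg h, if_neg h]
        congr 1
        rw [← ih (PySem.Set.add s p.2) v]
        refine pvFirsts_congr _ _ _ (fun w => ?_)
        simp only [PySem.Set.mem_add]
        tauto

-- B's worklist recursion computes the fold of pvStep over pvFirsts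
theorem worklist_eq (n : ℕ) : ∀ (l : List (String × String)) (t : String), l.length ≤ n →
    pvWorklist t l = (pvFirsts l []).foldl (fun r p => pvStep r p.2 p.1) t := by
  induction n with
  | zero =>
    intro l t hl
    have : l = [] := List.eq_nil_of_length_eq_zero (Nat.le_zero.mp hl)
    subst this; simp [pvWorklist, pvFirsts]
  | succ n ih =>
    intro l t hl
    match l with
    | [] => simp [pvWorklist, pvFirsts]
    | (name, value) :: rest =>
      simp only [pvWorklist, pvFirsts]
      rw [if_neg (by simp [PySem.Set.contains])]
      rw [List.foldl_cons]
      have hlen : (rest.filter (fun p => !(p.2 == value))).length ≤ n := by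
        have := List.length_filter_le (fun p => !(p.2 == value)) rest
        simp only [List.length_cons] at hl
        omega
      rw [ih _ _ hlen, ← pvFirsts_add rest [] value]
      rfl

-- ===== VERDICT (by name: the statement is the Claim_ definition above) =====
theorem restore_placeholders_spec : Claim_equal_restore_placeholders := by
  intro t reps _
  unfold Spec_restore_placeholders restore_placeholders restore_placeholders_alt
  by_cases he : reps.isEmpty
  · rw [if_pos he]
    have : reps = [] := List.isEmpty_iff.mp he
    subst this; simp [pvWorklist]
  · rw [if_neg he]
    rw [worklist_eq reps.length reps t le_rfl]
    simp only [astep_eq, ite_self]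
    rw [itemsA, List.foldl_map]
    simp only [pyGet0]
    have h1 : ∀ (t' : String),
        (PySem.Set.ofList (reps.map (fun p => p.2))).foldl
          (fun r v => PySem.Str.replace r v
            ("{" ++ ((reps.filter (fun p => p.2 == v)).map (fun p => p.1)).headD "" ++ "}")) t'
        = ((PySem.Set.ofList (reps.map (fun p => p.2))).map
            (fun v => (v, pvName v reps))).foldl (fun r q => pvStep r q.1 q.2) t' := by
      intro t'
      rw [List.foldl_map]
      simp [pvStep, pvName]
    rw [h1]
    have hbase := firsts_map reps []
    have hnilf : ((PySem.Set.ofList (reps.map (fun p => p.2))).filter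
        (fun v => !(PySem.Set.contains [] v)))
        = PySem.Set.ofList (reps.map (fun p => p.2)) := by
      simp [PySem.Set.contains]
    rw [hnilf] at hbase
    rw [hbase, List.foldl_map]
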